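-- pv_equiv track=rewrite | github.com/HerbertFeng/Herbert-Feng-GitHub | USACO/USACO 2023 December Contest, Bronze Test/2.Cowntact_Tracing_2.py | calculate_min
-- ===== SOURCE A (Python) =====
-- def calculate_min(count_cows=[]):
--     smallest = min(count_cows)
--
--     days = 0
--     while smallest != 1 and smallest != 2:
--         days += 1
--         smallest -= 2
--     total = sum(count_cows)
--     return total - 2 * days * len(count_cows)
-- ===== SOURCE B (Python) =====
-- def calculate_min(count_cows=[]):
--     # closed form: the loop halves (smallest-1); days = (min-1)//2
--     return sum(count_cows) - 2 * ((min(count_cows) - 1) // 2) * len(count_cows)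
-- ===== Notes on version B (the rewrite author's own statement) =====
-- stated objective: faster
-- what changed: Replaces the decrement-by-2 day-counting loop with the closed form (min-1)//2 in one expression; intended as faster (O(min) loop removed) — a timing run saw A time out at n=16 where B returned, but could not measure a ratio.
import Mathlib
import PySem

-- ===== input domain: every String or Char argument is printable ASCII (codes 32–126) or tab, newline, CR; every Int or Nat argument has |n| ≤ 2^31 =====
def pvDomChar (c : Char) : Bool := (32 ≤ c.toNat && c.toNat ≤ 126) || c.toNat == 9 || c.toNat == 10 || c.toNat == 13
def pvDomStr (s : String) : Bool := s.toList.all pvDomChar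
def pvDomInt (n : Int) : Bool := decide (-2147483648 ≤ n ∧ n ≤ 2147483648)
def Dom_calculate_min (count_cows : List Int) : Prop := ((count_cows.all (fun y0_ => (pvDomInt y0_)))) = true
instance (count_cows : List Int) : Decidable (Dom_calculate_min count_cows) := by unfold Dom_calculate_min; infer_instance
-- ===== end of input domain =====

-- B replaces A's decrement-by-2 day-counting loop with the closed form (min-1)//2 (intended as faster; a timing run saw A time out where B returned but could not measure a ratio).


-- ===== PORT A =====
-- the while loop; fuel = smallest.toNat only TOTALIZES it (enough fuel whenever smallest ≥ 1, where the Python loop terminates)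
def calcLoopA : Nat → Int → Int → Int
  | 0, _, days => days
  | fuel + 1, smallest, days =>
    if smallest ≠ 1 ∧ smallest ≠ 2 then calcLoopA fuel (smallest - 2) (days + 1) else days

def calculate_min (count_cows : List Int) : Int :=
  match PySem.List.min? count_cows (fun x => x) with
  | none => 0  -- min([]) raises ValueError; excluded by Pre_
  | some smallest =>
    let days := calcLoopA smallest.toNat smallest 0
    let total := count_cows.sum
    total - 2 * days * count_cows.length

-- ===== PORT B =====
def calculate_min_alt (count_cows : List Int) : Int :=
  match PySem.List.min? count_cows (fun x => x) with
  | none => 0  -- min([]) raises ValueError; excluded by Pre_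
  | some m => count_cows.sum - 2 * (PySem.Int.floordiv (m - 1) 2) * count_cows.length

-- ===== PRECONDITION & SPEC =====
-- Pre_ excludes the empty list (min raises ValueError) and lists with an element < 1 (A's loop never terminates).
def Pre_calculate_min (count_cows : List Int) : Prop :=
  count_cows ≠ [] ∧ ∀ x ∈ count_cows, 1 ≤ x
instance (count_cows : List Int) : Decidable (Pre_calculate_min count_cows) := by
  unfold Pre_calculate_min; infer_instance
def pvWitness_calculate_min : List Int := [3, 5, 2]

def Spec_calculate_min (count_cows : List Int) (out : Int) : Prop := out = calculate_min_alt count_cows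
instance (count_cows : List Int) (out : Int) : Decidable (Spec_calculate_min count_cows out) := by unfold Spec_calculate_min; infer_instance

-- ===== CLAIM (what is proved, stated in full; the proofs are below) =====
def Claim_equal_calculate_min : Prop := ∀ (count_cows : List Int), Dom_calculate_min count_cows → Pre_calculate_min count_cows → Spec_calculate_min count_cows (calculate_min count_cows)

-- ===== LEMMAS AND PROOFS =====

-- the loop computes days + (s-1)//2 whenever there is enough fuel and s ≥ 1
theorem calcLoopA_eq (n : Nat) : ∀ (s days : Int), 1 ≤ s → s.toNat ≤ n →
    calcLoopA n s days = days + PySem.Int.floordiv (s - 1) 2 := by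
  induction n with
  | zero => intro s days hs hle; omega
  | succ n ih =>
    intro s days hs hle
    rw [calcLoopA]
    by_cases h1 : s = 1
    · subst h1; simp [PySem.Int.floordiv]
    · by_cases h2 : s = 2
      · subst h2
        have h : PySem.Int.floordiv (2 - 1) 2 = 0 := by decide
        simp only [h, add_zero]
        simp
      · have hs3 : 3 ≤ s := by omega
        have h1' : (1 : Int) ≤ s - 2 := by omega
        have hfuel : (s - 2).toNat ≤ n := by omega
        rw [if_pos ⟨h1, h2⟩, ih (s - 2) (days + 1) h1' hfuel]
        have h2pos : (0 : Int) < 2 := by omega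
        have e1 := PySem.Int.floordiv_eq_ediv_of_pos (a := s - 3) h2pos
        have e2 := PySem.Int.floordiv_eq_ediv_of_pos (a := s - 1) h2pos
        rw [show s - 2 - 1 = s - 3 by ring, e1, e2]; omega

-- ===== VERDICT (by name: the statement is the Claim_ definition above) =====
theorem calculate_min_spec : Claim_equal_calculate_min := by
  intro xs _ hpre
  unfold Spec_calculate_min calculate_min calculate_min_alt
  cases hmin : PySem.List.min? xs (fun x => x) with
  | none => rfl
  | some m =>
    have hmem : m ∈ xs := PySem.List.min?_mem hmin
    have hm : 1 ≤ m := hpre.2 m hmem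
    simp only [calcLoopA_eq m.toNat m 0 hm (le_refl _), zero_add]
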